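-- pv_equiv track=rewrite | github.com/lepton-eda/lepton-eda | src/backend/gnet_partslist3.py | count_same_parts
-- ===== SOURCE A (Python) =====
-- def count_same_parts(ls):
--     if not ls:
--         return []
--
--     first_ls = ls[0][1:]
--     match_length = 0
--     for i, l in enumerate(reversed(ls)):
--         if l[1:] == first_ls:
--             match_length = len(ls) - i
--             break
--     rest_ls = ls[match_length:]
--     uref_ls = [l[0] for l in ls[:match_length]]
--
--     return [(uref_ls, first_ls + (str(match_length), ))] + \
--            count_same_parts(rest_ls)
-- ===== SOURCE B (Python) =====
-- def count_same_parts(ls):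
--     # O(n): one pass builds attribute-tuple -> rightmost index, one pass emits groups.
--     last = {}
--     for i, l in enumerate(ls):
--         last[l[1:]] = i
--     res = []
--     i = 0
--     n = len(ls)
--     while i < n:
--         t = ls[i][1:]
--         j = last[t]
--         res.append(([l[0] for l in ls[i:j + 1]], t + (str(j + 1 - i),)))
--         i = j + 1
--     return res
-- ===== Notes on version B (the rewrite author's own statement) =====
-- stated objective: faster
-- what changed: Replaced A's recursive per-group backward rescan of the whole remaining list by a single precomputed dictionary mapping each attribute tuple to its rightmost index, followed by one iterative forward pass over the list.
import Mathlib
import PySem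

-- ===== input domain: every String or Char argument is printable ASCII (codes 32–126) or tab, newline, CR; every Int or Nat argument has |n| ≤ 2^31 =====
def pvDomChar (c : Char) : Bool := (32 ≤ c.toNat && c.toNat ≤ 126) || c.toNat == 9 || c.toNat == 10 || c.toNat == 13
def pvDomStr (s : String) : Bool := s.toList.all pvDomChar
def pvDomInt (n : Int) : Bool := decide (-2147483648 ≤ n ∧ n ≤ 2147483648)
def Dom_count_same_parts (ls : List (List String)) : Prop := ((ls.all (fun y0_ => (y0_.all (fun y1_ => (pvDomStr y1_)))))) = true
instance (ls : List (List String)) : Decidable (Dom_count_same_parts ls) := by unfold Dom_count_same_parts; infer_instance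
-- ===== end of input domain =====

-- B replaces A's per-group backward rescans by one precomputed rightmost-index dictionary
-- and a single forward pass (faster, asymptotic).


-- ===== PORT A =====
-- the 'for i, l in enumerate(reversed(ls)): if l[1:] == first_ls: match_length = len(ls) - i; break' loop
def cspA_scan (first_ls : List String) (n : Nat) : List (List String) → Nat → Nat
  | [], _ => 0
  | l :: rest, i =>
    if PySem.List.slice l (some 1) none = first_ls then n - i
    else cspA_scan first_ls n rest (i + 1)

-- termination fact the recursion below cites: the scan finds a positive match_length
theorem cspA_scan_pos (t : List String) (n : Nat) :
    ∀ (rev : List (List String)) (i : Nat),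
      (∃ l ∈ rev, PySem.List.slice l (some 1) none = t) → i + rev.length ≤ n →
      0 < cspA_scan t n rev i := by
  intro rev
  induction rev with
  | nil => intro i h _; simp at h
  | cons l rest ih =>
    intro i h hn
    simp only [cspA_scan]
    by_cases hm : PySem.List.slice l (some 1) none = t
    · simp only [hm, if_true]
      simp only [List.length_cons] at hn
      omega
    · simp only [hm, if_false]
      rcases h with ⟨w, hw, hwt⟩
      rcases List.mem_cons.mp hw with hw | hw
      · exact absurd (hw ▸ hwt) hm
      · exact ih (i + 1) ⟨w, hw, hwt⟩ (by simp only [List.length_cons] at hn; omega)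

def count_same_parts (ls : List (List String)) : List (List String × List String) :=
  if _h : ls = [] then []
  else
    let first_ls := PySem.List.slice (PySem.List.pyGetD ls 0 []) (some 1) none
    let match_length := cspA_scan first_ls ls.length ls.reverse 0
    let rest_ls := PySem.List.slice ls (some (match_length : Int)) none
    let uref_ls := (PySem.List.slice ls none (some (match_length : Int))).map
      (fun l => PySem.List.pyGetD l 0 "")
    (uref_ls, first_ls ++ [PySem.Int.toStr (match_length : Int)]) :: count_same_parts rest_ls
termination_by ls.length
decreasing_by
  rcases hcons : ls with _ | ⟨l0, ls'⟩
  · exact absurd hcons _h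
  · have hpos : 0 < cspA_scan (PySem.List.slice (PySem.List.pyGetD ls 0 []) (some 1) none)
        ls.length ls.reverse 0 := by
      apply cspA_scan_pos
      · refine ⟨l0, ?_, ?_⟩
        · rw [hcons]; simp
        · rw [hcons]; simp [PySem.List.pyGetD_zero]
      · simp
    rw [hcons] at hpos
    simp only [PySem.List.slice_from_natCast, List.length_drop]
    simp only [List.unattach_reverse, List.unattach_attach]
    simp only [List.length_cons] at *
    omega

-- ===== PORT B =====
-- the 'while i < n' loop; fuel only makes it total (never exhausted: i strictly increases)
def cspB_loop (ls : List (List String)) (last : PySem.Dict (List String) Int) (n : Nat) :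
    Nat → Int → List (List String × List String)
  | 0, _ => []
  | fuel + 1, i =>
    if i < (n : Int) then
      let t := PySem.List.slice (PySem.List.pyGetD ls i []) (some 1) none
      let j := last.getD t 0
      ((PySem.List.slice ls (some i) (some (j + 1))).map (fun l => PySem.List.pyGetD l 0 ""),
        t ++ [PySem.Int.toStr (j + 1 - i)]) :: cspB_loop ls last n fuel (j + 1)
    else []

def count_same_parts_alt (ls : List (List String)) : List (List String × List String) :=
  let last := (PySem.List.enumerate ls 0).foldl
    (fun d p => d.insert (PySem.List.slice p.2 (some 1) none) p.1) PySem.Dict.empty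
  cspB_loop ls last ls.length ls.length 0

-- ===== PRECONDITION & SPEC =====
-- Pre_ excludes lists containing an empty part tuple, on which the Python A raises IndexError at l[0].
def Pre_count_same_parts (ls : List (List String)) : Prop := ∀ l ∈ ls, l ≠ []
instance (ls : List (List String)) : Decidable (Pre_count_same_parts ls) := by
  unfold Pre_count_same_parts; infer_instance
def pvWitness_count_same_parts : List (List String) := [["a", "x"], ["b", "x"]]
def Spec_count_same_parts (ls : List (List String)) (out : List (List String × List String)) : Prop :=
  out = count_same_parts_alt ls
instance (ls : List (List String)) (out : List (List String × List String)) :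
    Decidable (Spec_count_same_parts ls out) := by unfold Spec_count_same_parts; infer_instance

-- ===== CLAIM (what is proved, stated in full; the proofs are below) =====
def Claim_equal_count_same_parts : Prop := ∀ (ls : List (List String)),
  Dom_count_same_parts ls → Pre_count_same_parts ls →
  Spec_count_same_parts ls (count_same_parts ls)

-- ===== LEMMAS AND PROOFS =====

-- j is the index of the LAST element of L whose tail-slice equals t
def IsLast (L : List (List String)) (t : List String) (j : Nat) : Prop :=
  ∃ hj : j < L.length, PySem.List.slice L[j] (some 1) none = t ∧
    ∀ m, j < m → ∀ hm : m < L.length, PySem.List.slice L[m] (some 1) none ≠ t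

theorem isLast_append_match {xs : List (List String)} {x : List String} {t : List String} {j : Nat}
    (hx : PySem.List.slice x (some 1) none = t) (hj : IsLast (xs ++ [x]) t j) : j = xs.length := by
  obtain ⟨hjlt, hjm, hjmax⟩ := hj
  have hlen : j < xs.length + 1 := by simpa using hjlt
  by_contra hne
  have hjlt' : j < xs.length := by omega
  have h1 := hjmax xs.length hjlt' (by simp)
  rw [List.getElem_concat_length rfl] at h1
  exact h1 hx

theorem isLast_append_nomatch {xs : List (List String)} {x : List String} {t : List String} {j : Nat}
    (hx : PySem.List.slice x (some 1) none ≠ t) (hj : IsLast (xs ++ [x]) t j) :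
    j < xs.length ∧ IsLast xs t j := by
  obtain ⟨hjlt, hjm, hjmax⟩ := hj
  have hlen : j < xs.length + 1 := by simpa using hjlt
  have hne : j ≠ xs.length := by
    intro he
    apply hx
    rw [← hjm]
    congr 1
    subst he
    exact (List.getElem_concat_length rfl (by simp)).symm
  have hjlt' : j < xs.length := by omega
  refine ⟨hjlt', hjlt', ?_, ?_⟩
  · rw [← hjm, List.getElem_append_left hjlt']
  · intro m hm hmlt
    have := hjmax m hm (by simp; omega)
    rwa [List.getElem_append_left hmlt] at this

theorem exists_isLast (L : List (List String)) (t : List String)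
    (h : ∃ i, ∃ hi : i < L.length, PySem.List.slice L[i] (some 1) none = t) :
    ∃ j, IsLast L t j := by
  induction L using List.reverseRecOn with
  | nil => obtain ⟨i, hi, _⟩ := h; simp at hi
  | append_singleton xs x ih =>
    by_cases hx : PySem.List.slice x (some 1) none = t
    · refine ⟨xs.length, by simp, ?_, ?_⟩
      · rw [List.getElem_concat_length rfl]; exact hx
      · intro m hm hmlt
        have : m < xs.length + 1 := by simpa using hmlt
        omega
    · obtain ⟨i, hi, him⟩ := h
      have hlen : i < xs.length + 1 := by simpa using hi
      have hine : i ≠ xs.length := by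
        intro he
        apply hx
        rw [← him]
        congr 1
        subst he
        exact (List.getElem_concat_length rfl (by simp)).symm
      have hilt : i < xs.length := by omega
      obtain ⟨j, hjlt, hjm, hjmax⟩ := ih ⟨i, hilt, by rwa [List.getElem_append_left hilt] at him⟩
      refine ⟨j, by simp; omega, ?_, ?_⟩
      · rwa [List.getElem_append_left hjlt]
      · intro m hm hmlt
        have hmlen : m < xs.length + 1 := by simpa using hmlt
        by_cases hme : m = xs.length
        · subst hme
          rw [List.getElem_concat_length rfl]; exact hx
        · have hmlt' : m < xs.length := by omega
          have := hjmax m hm hmlt'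
          rwa [List.getElem_append_left hmlt']

theorem isLast_ge (L : List (List String)) (t : List String) (i j : Nat) (hi : i < L.length)
    (hm : PySem.List.slice L[i] (some 1) none = t) (hj : IsLast L t j) : i ≤ j := by
  obtain ⟨hjlt, hjm, hjmax⟩ := hj
  by_contra hlt
  exact hjmax i (by omega) hi hm

def buildDict (L : List (List String)) : PySem.Dict (List String) Int :=
  (PySem.List.enumerate L 0).foldl
    (fun d p => d.insert (PySem.List.slice p.2 (some 1) none) p.1) PySem.Dict.empty

theorem buildDict_snoc (xs : List (List String)) (x : List String) :
    buildDict (xs ++ [x]) =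
      (buildDict xs).insert (PySem.List.slice x (some 1) none) ((xs.length : Int)) := by
  unfold buildDict
  rw [PySem.List.enumerate_append, List.foldl_append]
  simp [PySem.List.enumerate]

theorem buildDict_get? (L : List (List String)) (t : List String) (j : Nat) (hj : IsLast L t j) :
    (buildDict L).get? t = some (j : Int) := by
  induction L using List.reverseRecOn generalizing j with
  | nil => obtain ⟨hjlt, _, _⟩ := hj; simp at hjlt
  | append_singleton xs x ih =>
    rw [buildDict_snoc, PySem.Dict.get?_insert]
    by_cases hx : PySem.List.slice x (some 1) none = t
    · have := isLast_append_match hx hj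
      subst this
      simp [hx]
    · have hne : ¬ t = PySem.List.slice x (some 1) none := fun he => hx he.symm
      rw [if_neg hne]
      obtain ⟨_, hxs⟩ := isLast_append_nomatch hx hj
      exact ih j hxs

theorem scanA_spec (t : List String) (s : List (List String)) (j : Nat) (hj : IsLast s t j)
    (n i : Nat) : cspA_scan t n s.reverse i = n - i - (s.length - 1 - j) := by
  induction s using List.reverseRecOn generalizing j i with
  | nil => obtain ⟨hjlt, _, _⟩ := hj; simp at hjlt
  | append_singleton xs x ih =>
    rw [List.reverse_append]
    simp only [List.reverse_singleton, List.singleton_append, cspA_scan]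
    by_cases hx : PySem.List.slice x (some 1) none = t
    · rw [if_pos hx]
      have := isLast_append_match hx hj
      subst this
      simp
    · rw [if_neg hx]
      obtain ⟨hjlt, hxs⟩ := isLast_append_nomatch hx hj
      rw [ih j hxs]
      simp only [List.length_append, List.length_cons, List.length_nil]
      omega

theorem isLast_drop_prefix (A s : List (List String)) (t : List String) (j : Nat)
    (hj : IsLast (A ++ s) t j) (hge : A.length ≤ j) : IsLast s t (j - A.length) := by
  obtain ⟨hjlt, hjm, hjmax⟩ := hj
  have hlen : j < A.length + s.length := by simpa using hjlt
  refine ⟨by omega, ?_, ?_⟩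
  · rwa [List.getElem_append_right hge] at hjm
  · intro m hm hmlt
    have h1 := hjmax (A.length + m) (by omega) (by simp; omega)
    rw [List.getElem_append_right (by omega)] at h1
    simpa using h1

theorem main_loop (L : List (List String)) :
    ∀ (fuel : Nat) (A s : List (List String)), L = A ++ s → s.length ≤ fuel →
      cspB_loop L (buildDict L) L.length fuel (A.length : Int) = count_same_parts s := by
  intro fuel
  induction fuel generalizing L with
  | zero =>
    intro A s hL hf
    have hs : s = [] := List.eq_nil_of_length_eq_zero (by omega)
    subst hs
    rw [count_same_parts]
    simp [cspB_loop]
  | succ f ih =>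
    intro A s hL hf
    cases s with
    | nil =>
      subst hL
      rw [count_same_parts]
      have hnlt : ¬ ((A.length : Int) < (((A ++ ([] : List (List String))).length : Nat) : Int)) := by
        simp
      simp only [cspB_loop, if_neg hnlt]
      simp
    | cons hd s' =>
      subst hL
      have hi : A.length < (A ++ hd :: s').length := by
        simp [List.length_append]
      simp only [cspB_loop]
      rw [if_pos (by exact_mod_cast hi)]
      have hget : PySem.List.pyGetD (A ++ hd :: s') ((A.length : Nat) : Int) [] = hd := by
        rw [PySem.List.pyGetD_natCast, List.getD_eq_getElem _ _ hi,
          List.getElem_append_right (le_refl A.length)]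
        simp
      rw [hget]
      have hmatch : PySem.List.slice ((A ++ hd :: s')[A.length]'hi) (some 1) none =
          PySem.List.slice hd (some 1) none := by
        rw [List.getElem_append_right (le_refl A.length)]
        simp
      obtain ⟨jN, hlastP⟩ :=
        exists_isLast (A ++ hd :: s') (PySem.List.slice hd (some 1) none) ⟨A.length, hi, hmatch⟩
      have hge : A.length ≤ jN := isLast_ge _ _ A.length jN hi hmatch hlastP
      obtain ⟨hjlt, -, -⟩ := id hlastP
      have hdict : (buildDict (A ++ hd :: s')).getD (PySem.List.slice hd (some 1) none) 0 =
          ((jN : Nat) : Int) :=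
        PySem.Dict.getD_of_get?_eq_some _ 0 (buildDict_get? _ _ jN hlastP)
      rw [hdict]
      have hlocal : IsLast (hd :: s') (PySem.List.slice hd (some 1) none) (jN - A.length) :=
        isLast_drop_prefix A (hd :: s') _ jN hlastP hge
      obtain ⟨hllt, -, -⟩ := id hlocal
      -- unfold A on hd :: s'
      rw [count_same_parts]
      rw [dif_neg (List.cons_ne_nil hd s')]
      simp only [PySem.List.pyGetD_zero_cons]
      have hml : cspA_scan (PySem.List.slice hd (some 1) none) (hd :: s').length
          (hd :: s').reverse 0 = jN - A.length + 1 := by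
        rw [scanA_spec _ (hd :: s') (jN - A.length) hlocal]
        simp only [List.length_cons] at hllt ⊢
        omega
      rw [hml]
      have hlen' : jN - A.length < s'.length + 1 := by simpa using hllt
      -- head components
      have hsliceB : PySem.List.slice (A ++ hd :: s') (some ((A.length : Nat) : Int))
          (some (((jN : Nat) : Int) + 1)) = (hd :: s').take (jN - A.length + 1) := by
        rw [show (((jN : Nat) : Int) + 1) = (((jN + 1 : Nat) : Nat) : Int) by push_cast; ring]
        rw [PySem.List.slice_natCast, List.drop_left]
        congr 1
        omega
      have hsliceA : PySem.List.slice (hd :: s') none (some ((jN - A.length + 1 : Nat) : Int)) =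
          (hd :: s').take (jN - A.length + 1) := by
        rw [PySem.List.slice_to_natCast]
      have hstr : ((jN : Nat) : Int) + 1 - ((A.length : Nat) : Int) =
          ((jN - A.length + 1 : Nat) : Int) := by omega
      -- rest
      have hrest : PySem.List.slice (hd :: s') (some ((jN - A.length + 1 : Nat) : Int)) none =
          (hd :: s').drop (jN - A.length + 1) := PySem.List.slice_from_natCast _ _
      have hLsplit : A ++ hd :: s' =
          (A ++ (hd :: s').take (jN - A.length + 1)) ++ (hd :: s').drop (jN - A.length + 1) := by
        rw [List.append_assoc, List.take_append_drop]
      have hfuel : ((hd :: s').drop (jN - A.length + 1)).length ≤ f := by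
        simp only [List.length_drop, List.length_cons]
        simp only [List.length_cons] at hf
        omega
      have htail := ih (A ++ hd :: s') (A ++ (hd :: s').take (jN - A.length + 1))
        ((hd :: s').drop (jN - A.length + 1)) hLsplit hfuel
      have hidx : (((A ++ (hd :: s').take (jN - A.length + 1)).length : Nat) : Int) =
          ((jN : Nat) : Int) + 1 := by
        simp only [List.length_append, List.length_take, List.length_cons]
        omega
      rw [hidx] at htail
      rw [hsliceB, hsliceA, hstr, hrest, htail]

-- ===== VERDICT (by name: the statement is the Claim_ definition above) =====
theorem count_same_parts_spec : Claim_equal_count_same_parts := by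
  intro ls _ _
  unfold Spec_count_same_parts count_same_parts_alt
  have h := main_loop ls ls.length [] ls rfl le_rfl
  simpa [buildDict] using h.symm
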